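-- pv_equiv track=rewrite | github.com/Ram-Prasaanth/university-oracel | app/dataProcess.py | process_search_titles_values
-- ===== SOURCE A (Python) =====
-- def process_title(title: str)->str:
--     """return a string with extra spaces on both ends trimmed and the title-cased
--
--     Args:
--         title (str): str input
--
--     Returns:
--         str: string with extra soaces trimmed and title cased
--     """
--     return title.strip().title()
--
-- def process_value(value: str) -> str:
--     """remove the extra space in both sides of the input passed"""
--     return value.strip()
--
-- def process_search_titles_values(search_titles, search_values) -> dict:
--     """
--     Combines search_titles with search_values to form a dictionary.
--     If 'All' is in search_titles, returns an empty dictionary to retrieve all documents.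
--
--     Args:
--         search_titles (list): List of search titles.
--         search_values (list): List of search values corresponding to search_titles.
--
--     Returns:
--         dict: Dictionary of search attributes.
--     """
--
--     # Early return for the 'All' condition
--     if "All" in search_titles:
--         return {}
--
--     # Initialize an empty dictionary to store search attributes
--     search_attributes = {}
--
--     # Iterate over title-value pairs using zip
--     for title, value in zip(search_titles, search_values):
--         # Process title and value
--         processed_title = process_title(title)
--         processed_value = process_value(value)
--
--         # Use setdefault to simplify the logic for initializing and appending to the list
--         search_attributes.setdefault(processed_title, {'$in': []}).get('$in').append(processed_value)
--
--     return search_attributes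
-- ===== SOURCE B (Python) =====
-- def process_search_titles_values(search_titles, search_values) -> dict:
--     """Staged re-implementation: precompute the processed (title, value) pairs,
--     then walk the distinct titles in first-seen order, building each entry by
--     an inner scan of the pairs collecting that title's values."""
--     if "All" in search_titles:
--         return {}
--     pairs = [(t.strip().title(), v.strip()) for t, v in zip(search_titles, search_values)]
--     result = {}
--     for key, _ in pairs:
--         if key not in result:
--             result[key] = {'$in': [v for k, v in pairs if k == key]}
--     return result
-- ===== Notes on version B (the rewrite author's own statement) =====
-- stated objective: alternative
-- what changed: B drops A's incremental setdefault-append grouping: it precomputes the processed pairs, then builds each distinct title's entry in one shot by an inner scan of the pairs collecting all of that title's values (nested scans instead of a single accumulating pass).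
import Mathlib
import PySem

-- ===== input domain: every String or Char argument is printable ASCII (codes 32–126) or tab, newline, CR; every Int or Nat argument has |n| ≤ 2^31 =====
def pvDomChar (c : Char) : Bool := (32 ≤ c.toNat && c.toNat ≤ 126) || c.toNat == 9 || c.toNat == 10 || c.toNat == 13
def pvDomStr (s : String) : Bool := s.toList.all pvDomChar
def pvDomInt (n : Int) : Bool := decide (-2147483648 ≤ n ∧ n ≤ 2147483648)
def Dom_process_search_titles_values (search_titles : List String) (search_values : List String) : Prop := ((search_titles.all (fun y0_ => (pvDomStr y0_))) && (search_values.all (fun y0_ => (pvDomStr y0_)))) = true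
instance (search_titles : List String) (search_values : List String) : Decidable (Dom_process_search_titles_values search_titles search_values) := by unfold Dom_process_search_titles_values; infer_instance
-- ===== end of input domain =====

-- B replaces A's incremental setdefault-append grouping by staged passes: precompute the
-- processed pairs, then build each distinct title's entry in one shot by an inner scan of
-- the pairs collecting that title's values (objective: alternative).

-- str.title() ported by hand (exact on ASCII: a letter is upper-cased after a
-- non-letter, lower-cased after a letter; non-letters unchanged).
def pyTitleChars : List Char → Bool → List Char
  | [], _ => []
  | c :: rest, prevAlpha =>
    (if PySem.Chars.isalpha c then (if prevAlpha then PySem.Chars.lowerChar c else PySem.Chars.upperChar c) else c)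
      :: pyTitleChars rest (PySem.Chars.isalpha c)

def pyTitle (s : String) : String := String.ofList (pyTitleChars s.toList false)

-- ===== PORT A =====
-- A's same-module helpers
def process_title (title : String) : String := pyTitle (PySem.Str.strip title)
def process_value (value : String) : String := PySem.Str.strip value

-- the in-place `.get('$in').append(pv)` on the inner dict, step for step on the
-- insertion-ordered assoc list (exact: appends to the list stored under "$in")
def pvAppendIn : List (String × List String) → String → List (String × List String)
  | [], _ => []
  | (k, vs) :: rest, v =>
    if k = "$in" then (k, vs ++ [v]) :: rest else (k, vs) :: pvAppendIn rest v

-- `search_attributes.setdefault(pt, {'$in': []}).get('$in').append(pv)`, step for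
-- step on the insertion-ordered assoc list (first match updated in place; a new
-- key is appended at the end) — exact Python dict semantics
def pvSetdefaultAppend : List (String × List (String × List String)) → String → String →
    List (String × List (String × List String))
  | [], t, v => [(t, [("$in", [v])])]
  | (k, inner) :: rest, t, v =>
    if k = t then (k, pvAppendIn inner v) :: rest
    else (k, inner) :: pvSetdefaultAppend rest t v

def process_search_titles_values (search_titles : List String) (search_values : List String) :
    List (String × List (String × List String)) :=
  if "All" ∈ search_titles then []
  else
    (search_titles.zip search_values).foldl
      (fun acc tv => pvSetdefaultAppend acc (process_title tv.1) (process_value tv.2)) []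

-- ===== PORT B =====
-- Source B's `pairs = [(t.strip().title(), v.strip()) for t, v in zip(...)]`
def pvPairs (search_titles search_values : List String) : List (String × String) :=
  (search_titles.zip search_values).map
    (fun tv => (pyTitle (PySem.Str.strip tv.1), PySem.Str.strip tv.2))

-- Source B's `for key, _ in pairs: if key not in result: result[key] = {'$in': [v for k, v in pairs if k == key]}`
def process_search_titles_values_alt (search_titles : List String) (search_values : List String) :
    List (String × List (String × List String)) :=
  if "All" ∈ search_titles then []
  else
    (pvPairs search_titles search_values).foldl
      (fun r kv =>
        if r.any (fun p => p.1 = kv.1) then r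
        else r ++ [(kv.1, [("$in",
          ((pvPairs search_titles search_values).filter (fun q => q.1 = kv.1)).map Prod.snd)])])
      []

-- ===== PRECONDITION & SPEC =====
def Spec_process_search_titles_values (search_titles : List String) (search_values : List String) (out : List (String × List (String × List String))) : Prop := out = process_search_titles_values_alt search_titles search_values
instance (search_titles : List String) (search_values : List String) (out : List (String × List (String × List String))) : Decidable (Spec_process_search_titles_values search_titles search_values out) := by unfold Spec_process_search_titles_values; infer_instance

-- ===== CLAIM (what is proved, stated in full; the proofs are below) =====
def Claim_equal_process_search_titles_values : Prop := ∀ (search_titles : List String) (search_values : List String), Dom_process_search_titles_values search_titles search_values → Spec_process_search_titles_values search_titles search_values (process_search_titles_values search_titles search_values)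

-- ===== LEMMAS AND PROOFS =====

-- A-side one-pass grouping (flat), the common reference point of both proofs
def pvGroupAdd : List (String × List String) → String → String → List (String × List String)
  | [], t, v => [(t, [v])]
  | (k, vs) :: rest, t, v =>
    if k = t then (k, vs ++ [v]) :: rest else (k, vs) :: pvGroupAdd rest t v

def pvWrap (g : List (String × List String)) : List (String × List (String × List String)) :=
  g.map (fun p => (p.1, [("$in", p.2)]))

theorem pvSetdefaultAppend_wrap (g : List (String × List String)) (t v : String) :
    pvSetdefaultAppend (pvWrap g) t v = pvWrap (pvGroupAdd g t v) := by
  induction g with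
  | nil => simp [pvWrap, pvSetdefaultAppend, pvGroupAdd]
  | cons p rest ih =>
    obtain ⟨k, vs⟩ := p
    simp only [pvWrap] at ih ⊢
    by_cases h : k = t <;>
      simp [pvSetdefaultAppend, pvGroupAdd, pvAppendIn, h, ih]

-- first-seen deduplication of a key list (structural, with a 'seen' accumulator)
def dedupFirstAux (seen : List String) : List String → List String
  | [] => []
  | k :: ks => if k ∈ seen then dedupFirstAux seen ks else k :: dedupFirstAux (k :: seen) ks

def dedupFirst (ks : List String) : List String := dedupFirstAux [] ks

theorem mem_dedupFirstAux (x : String) (ks : List String) : ∀ seen : List String,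
    x ∈ dedupFirstAux seen ks ↔ (x ∈ ks ∧ x ∉ seen) := by
  induction ks with
  | nil => intro seen; simp [dedupFirstAux]
  | cons k ks ih =>
    intro seen
    by_cases hk : k ∈ seen
    · by_cases hx : x = k
      · subst hx; simp [dedupFirstAux, hk, ih]
      · simp [dedupFirstAux, hk, ih, hx]
    · by_cases hx : x = k
      · subst hx; simp [dedupFirstAux, hk, ih]
      · simp [dedupFirstAux, hk, ih, hx]

theorem mem_dedupFirst (x : String) (ks : List String) : x ∈ dedupFirst ks ↔ x ∈ ks := by
  simp [dedupFirst, mem_dedupFirstAux]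

theorem nodup_dedupFirstAux (ks : List String) : ∀ seen : List String,
    (dedupFirstAux seen ks).Nodup := by
  induction ks with
  | nil => intro seen; simp [dedupFirstAux]
  | cons k ks ih =>
    intro seen
    by_cases hk : k ∈ seen
    · simpa [dedupFirstAux, hk] using ih seen
    · rw [show dedupFirstAux seen (k :: ks) = k :: dedupFirstAux (k :: seen) ks from by
        simp [dedupFirstAux, hk]]
      refine List.nodup_cons.mpr ⟨?_, ih (k :: seen)⟩
      intro hmem
      exact ((mem_dedupFirstAux k ks (k :: seen)).mp hmem).2 (by simp)

theorem nodup_dedupFirst (ks : List String) : (dedupFirst ks).Nodup :=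
  nodup_dedupFirstAux ks []

theorem dedupFirstAux_snoc (k : String) (ks : List String) : ∀ seen : List String,
    dedupFirstAux seen (ks ++ [k])
      = dedupFirstAux seen ks ++ (if k ∈ seen ∨ k ∈ ks then [] else [k]) := by
  induction ks with
  | nil => intro seen; by_cases h1 : k ∈ seen <;> simp [dedupFirstAux, h1]
  | cons a ks ih =>
    intro seen
    by_cases h3 : k = a
    · subst h3
      by_cases ha : k ∈ seen
      · simp [dedupFirstAux, ha, ih seen]
      · simp [dedupFirstAux, ha, ih (k :: seen)]
    · by_cases ha : a ∈ seen
      · simp [dedupFirstAux, ha, ih seen, h3]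
      · simp [dedupFirstAux, ha, ih (a :: seen), h3]

theorem dedupFirst_snoc (k : String) (ks : List String) :
    dedupFirst (ks ++ [k]) = dedupFirst ks ++ (if k ∈ ks then [] else [k]) := by
  simpa using dedupFirstAux_snoc k ks []

-- the flat grouping spec: distinct keys in first-seen order, each with its filtered values
def pvGspec (pre : List (String × String)) : List (String × List String) :=
  (dedupFirst (pre.map Prod.fst)).map
    (fun k => (k, (pre.filter (fun q => q.1 = k)).map Prod.snd))

theorem pvGroupAdd_not_mem (g : List (String × List String)) (k v : String)
    (h : ∀ p ∈ g, p.1 ≠ k) : pvGroupAdd g k v = g ++ [(k, [v])] := by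
  induction g with
  | nil => rfl
  | cons p rest ih =>
    obtain ⟨a, vs⟩ := p
    have ha : a ≠ k := h (a, vs) (by simp)
    simp [pvGroupAdd, ha, ih (fun q hq => h q (by simp [hq]))]

theorem pvGroupAdd_map (l : List String) (vals : String → List String) (k v : String)
    (hnd : l.Nodup) (hm : k ∈ l) :
    pvGroupAdd (l.map (fun k' => (k', vals k'))) k v
      = l.map (fun k' => (k', if k' = k then vals k' ++ [v] else vals k')) := by
  induction l with
  | nil => simp at hm
  | cons a l ih =>
    rcases List.nodup_cons.mp hnd with ⟨hna, hnd'⟩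
    by_cases hak : a = k
    · subst hak
      have hmap : List.map (fun k' => (k', if k' = a then vals k' ++ [v] else vals k')) l
          = List.map (fun k' => (k', vals k')) l :=
        List.map_congr_left (fun x hx => by
          have hxa : x ≠ a := fun h => hna (h ▸ hx)
          simp [hxa])
      simp [pvGroupAdd, hmap]
    · have hm' : k ∈ l := by
        rcases List.mem_cons.mp hm with h | h
        · exact absurd h.symm hak
        · exact h
      simp [pvGroupAdd, hak, ih hnd' hm']

theorem pvGspec_snoc (pre : List (String × String)) (k v : String) :
    pvGroupAdd (pvGspec pre) k v = pvGspec (pre ++ [(k, v)]) := by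
  by_cases hm : k ∈ pre.map Prod.fst
  · -- key already seen: append v inside the existing entry
    unfold pvGspec
    rw [pvGroupAdd_map _ _ _ _ (nodup_dedupFirst _) ((mem_dedupFirst _ _).mpr hm)]
    have hded : dedupFirst ((pre ++ [(k, v)]).map Prod.fst) = dedupFirst (pre.map Prod.fst) := by
      simp [dedupFirst_snoc, hm]
    rw [hded]
    refine List.map_congr_left ?_
    intro x hx
    by_cases hxk : x = k
    · simp [hxk, List.filter_append]
    · simp [hxk, Ne.symm hxk, List.filter_append]
  · -- new key: appended at the end with its single value
    unfold pvGspec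
    have hfilter : pre.filter (fun q => q.1 = k) = [] := by
      refine List.filter_eq_nil_iff.mpr ?_
      intro q hq
      simp only [decide_eq_true_eq]
      intro hqk
      exact hm (List.mem_map.mpr ⟨q, hq, hqk⟩)
    rw [pvGroupAdd_not_mem]
    · have hded : dedupFirst ((pre ++ [(k, v)]).map Prod.fst)
          = dedupFirst (pre.map Prod.fst) ++ [k] := by
        simp [dedupFirst_snoc, hm]
      rw [hded, List.map_append]
      congr 1
      · refine List.map_congr_left ?_
        intro x hx
        have hxk : x ≠ k := fun h => hm (h ▸ (mem_dedupFirst x _).mp hx)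
        simp [List.filter_append, Ne.symm hxk]
      · simp [List.filter_append, hfilter]
    · intro p hp
      rcases List.mem_map.mp hp with ⟨k', hk', rfl⟩
      exact fun h => hm (h ▸ (mem_dedupFirst k' _).mp hk')

theorem foldl_groupAdd (suf : List (String × String)) : ∀ pre : List (String × String),
    suf.foldl (fun g kv => pvGroupAdd g kv.1 kv.2) (pvGspec pre) = pvGspec (pre ++ suf) := by
  induction suf with
  | nil => intro pre; simp
  | cons kv suf ih =>
    intro pre
    rw [List.foldl_cons, pvGspec_snoc, ih (pre ++ [(kv.1, kv.2)])]
    simp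

-- B-side spec accumulator: distinct keys first-seen in pre, values filtered from the FULL list P
def pvRspec (pre P : List (String × String)) : List (String × List (String × List String)) :=
  (dedupFirst (pre.map Prod.fst)).map
    (fun k => (k, [("$in", (P.filter (fun q => q.1 = k)).map Prod.snd)]))

theorem pvRspec_any (pre P : List (String × String)) (k : String) :
    ((pvRspec pre P).any fun p => p.1 = k) = decide (k ∈ pre.map Prod.fst) := by
  by_cases hm : k ∈ pre.map Prod.fst
  · rw [decide_eq_true hm]
    exact List.any_eq_true.mpr
      ⟨_, List.mem_map.mpr ⟨k, (mem_dedupFirst _ _).mpr hm, rfl⟩, by simp⟩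
  · rw [decide_eq_false hm]
    refine List.any_eq_false.mpr ?_
    rintro p hmem
    rcases List.mem_map.mp hmem with ⟨k', hk', rfl⟩
    simp only [decide_eq_true_eq]
    intro hk
    exact hm (hk ▸ (mem_dedupFirst k' _).mp hk')

theorem pvRspec_step (pre P : List (String × String)) (k v : String) :
    (if (pvRspec pre P).any (fun p => p.1 = k) then pvRspec pre P
     else pvRspec pre P ++ [(k, [("$in", (P.filter (fun q => q.1 = k)).map Prod.snd)])])
      = pvRspec (pre ++ [(k, v)]) P := by
  rw [pvRspec_any]
  by_cases hm : k ∈ pre.map Prod.fst <;>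
    simp [hm, pvRspec, dedupFirst_snoc, List.map_append]

theorem foldl_Bstep (P : List (String × String)) (suf : List (String × String)) :
    ∀ pre : List (String × String),
    suf.foldl
        (fun r kv =>
          if r.any (fun p => p.1 = kv.1) then r
          else r ++ [(kv.1, [("$in", (P.filter (fun q => q.1 = kv.1)).map Prod.snd)])])
        (pvRspec pre P)
      = pvRspec (pre ++ suf) P := by
  induction suf with
  | nil => intro pre; simp
  | cons kv suf ih =>
    intro pre
    rw [List.foldl_cons, pvRspec_step pre P kv.1 kv.2, ih (pre ++ [(kv.1, kv.2)])]
    simp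

theorem wrap_Gspec_eq_Rspec (P : List (String × String)) : pvWrap (pvGspec P) = pvRspec P P := by
  simp [pvWrap, pvGspec, pvRspec, List.map_map, Function.comp]

theorem fold_setdefault_wrap (pairs : List (String × String)) :
    ∀ g : List (String × List String),
    pairs.foldl (fun acc kv => pvSetdefaultAppend acc kv.1 kv.2) (pvWrap g)
      = pvWrap (pairs.foldl (fun g kv => pvGroupAdd g kv.1 kv.2) g) := by
  induction pairs with
  | nil => intro g; rfl
  | cons kv rest ih =>
    intro g
    rw [List.foldl_cons, List.foldl_cons, pvSetdefaultAppend_wrap]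
    exact ih _

theorem dedupFirst_nil : dedupFirst [] = [] := rfl

-- ===== VERDICT (by name: the statement is the Claim_ definition above) =====
theorem process_search_titles_values_spec : Claim_equal_process_search_titles_values := by
  intro ts vs _
  unfold Spec_process_search_titles_values process_search_titles_values process_search_titles_values_alt
  by_cases h : "All" ∈ ts
  · rw [if_pos h, if_pos h]
  · rw [if_neg h, if_neg h]
    have hA : (ts.zip vs).foldl
        (fun acc tv => pvSetdefaultAppend acc (process_title tv.1) (process_value tv.2)) []
        = (pvPairs ts vs).foldl (fun acc kv => pvSetdefaultAppend acc kv.1 kv.2) [] := by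
      rw [pvPairs, List.foldl_map]
      rfl
    have h0g : pvGspec [] = [] := by simp [pvGspec, dedupFirst_nil]
    have h0r : pvRspec [] (pvPairs ts vs) = [] := by simp [pvRspec, dedupFirst_nil]
    have hGfold := foldl_groupAdd (pvPairs ts vs) []
    rw [h0g, List.nil_append] at hGfold
    have hB := foldl_Bstep (pvPairs ts vs) (pvPairs ts vs) []
    rw [h0r, List.nil_append] at hB
    calc (ts.zip vs).foldl
          (fun acc tv => pvSetdefaultAppend acc (process_title tv.1) (process_value tv.2)) []
        = (pvPairs ts vs).foldl (fun acc kv => pvSetdefaultAppend acc kv.1 kv.2) [] := hA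
      _ = pvWrap ((pvPairs ts vs).foldl (fun g kv => pvGroupAdd g kv.1 kv.2) []) :=
          fold_setdefault_wrap (pvPairs ts vs) []
      _ = pvWrap (pvGspec (pvPairs ts vs)) := by rw [hGfold]
      _ = pvRspec (pvPairs ts vs) (pvPairs ts vs) := wrap_Gspec_eq_Rspec _
      _ = _ := hB.symm
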